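-- pv_equiv track=rewrite | github.com/DamianJFlett/AdventOfCode2024 | day_22/sol.py | evolve
-- ===== SOURCE A (Python) =====
-- con = 2 ** 24 - 1
--
-- def prune(num):
--     return num & con
--
-- def mix(num1, num2):
--     return num1 ^ num2
--
-- def evolve(num, times):
--     for i in range(times):
--         num = mix(num << 6, num)
--         num = prune(num)
--         num = mix(num >> 5, num)
--         num = prune(num)
--         num = mix(num << 11, num)
--         num = prune(num)
--     return num
-- ===== SOURCE B (Python) =====
-- # Cycle-detecting re-implementation: the 24-bit scramble is eventually periodic,
-- # so detect the first repeated state and jump ahead with a modulus instead of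
-- # iterating all `times` rounds.
-- CON = 2 ** 24 - 1
--
-- def _step(n):
--     n = ((n << 6) ^ n) & CON
--     n = ((n >> 5) ^ n) & CON
--     n = ((n << 11) ^ n) & CON
--     return n
--
-- def evolve(num, times):
--     seen = {}
--     n = num
--     i = 0
--     while i < times:
--         if n in seen:
--             r = (times - i) % (i - seen[n])
--             for _ in range(r):
--                 n = _step(n)
--             return n
--         seen[n] = i
--         n = _step(n)
--         i += 1
--     return n
-- ===== Notes on version B (the rewrite author's own statement) =====
-- stated objective: alternative
-- what changed: B replaces A's unconditional times-round loop by cycle detection on the 24-bit state (a dict of first-seen indices); once a state repeats, the remaining rounds are reduced modulo the period, bounding the work by min(times, tail+period) instead of times.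
import Mathlib
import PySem

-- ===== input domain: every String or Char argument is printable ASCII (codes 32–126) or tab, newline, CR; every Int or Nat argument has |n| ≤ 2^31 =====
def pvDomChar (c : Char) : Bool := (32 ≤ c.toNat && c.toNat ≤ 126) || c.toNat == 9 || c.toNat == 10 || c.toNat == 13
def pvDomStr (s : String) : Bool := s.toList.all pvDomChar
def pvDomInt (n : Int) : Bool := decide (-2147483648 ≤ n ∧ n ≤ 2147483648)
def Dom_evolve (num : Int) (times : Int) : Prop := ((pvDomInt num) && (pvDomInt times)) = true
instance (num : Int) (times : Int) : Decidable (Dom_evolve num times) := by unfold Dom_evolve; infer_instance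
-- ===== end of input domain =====

-- B replaces A's `times`-round loop by cycle detection on the 24-bit state:
-- once a state repeats, the remaining rounds are taken modulo the period.

-- ===== PORT A =====
def pvCon : Int := 2 ^ 24 - 1

def prune (num : Int) : Int := PySem.Int.band num pvCon

def mix (num1 : Int) (num2 : Int) : Int := PySem.Int.bxor num1 num2

def evolve (num : Int) (times : Int) : Int :=
  (PySem.List.pyRange 0 times 1).foldl (fun num _ =>
    let num := prune (mix (num <<< (6 : Nat)) num)
    let num := prune (mix (num >>> (5 : Nat)) num)
    let num := prune (mix (num <<< (11 : Nat)) num)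
    num) num

-- ===== PORT B =====
def pvStep (n : Int) : Int :=
  let n := PySem.Int.band (PySem.Int.bxor (n <<< (6 : Nat)) n) pvCon
  let n := PySem.Int.band (PySem.Int.bxor (n >>> (5 : Nat)) n) pvCon
  let n := PySem.Int.band (PySem.Int.bxor (n <<< (11 : Nat)) n) pvCon
  n

-- the while-loop of Source B; `seen` is the Python dict state → first index
def evolveAltGo (times : Int) (seen : PySem.Dict Int Int) (n : Int) (i : Int) : Int :=
  if _h : i < times then
    match seen.get? n with
    | some j =>
      let r := PySem.Int.mod (times - i) (i - j)
      (PySem.List.pyRange 0 r 1).foldl (fun n _ => pvStep n) n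
    | none => evolveAltGo times (seen.insert n i) (pvStep n) (i + 1)
  else n
termination_by (times - i).toNat
decreasing_by omega

def evolve_alt (num : Int) (times : Int) : Int :=
  evolveAltGo times PySem.Dict.empty num 0

-- ===== PRECONDITION & SPEC =====
def Spec_evolve (num : Int) (times : Int) (out : Int) : Prop := out = evolve_alt num times
instance (num : Int) (times : Int) (out : Int) : Decidable (Spec_evolve num times out) := by unfold Spec_evolve; infer_instance

-- ===== CLAIM (what is proved, stated in full; the proofs are below) =====
def Claim_equal_evolve : Prop := ∀ (num : Int) (times : Int), Dom_evolve num times → Spec_evolve num times (evolve num times)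

-- ===== LEMMAS AND PROOFS =====

-- a foldl over any list with a body that ignores the element is an iterate
theorem foldl_const_iterate (g : Int → Int) : ∀ (L : List Int) (x : Int),
    L.foldl (fun y _ => g y) x = g^[L.length] x := by
  intro L
  induction L with
  | nil => intro x; rfl
  | cons a L ih =>
    intro x
    simp [List.foldl_cons, ih, Function.iterate_succ_apply]

theorem evolve_eq_iterate (num times : Int) :
    evolve num times = pvStep^[times.toNat] num := by
  unfold evolve
  rw [foldl_const_iterate, PySem.List.length_pyRange_one]
  have h : (times - 0).toNat = times.toNat := by omega
  rw [h]
  rfl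

-- periodicity: once the orbit repeats (g^[J+P] x = g^[J] x),
-- any later index can be shifted by multiples of P
theorem iterate_periodic (g : Int → Int) (x : Int) (J P : Nat)
    (h : g^[J + P] x = g^[J] x) :
    ∀ (m t : Nat), J ≤ t → g^[t + P * m] x = g^[t] x := by
  have hstep : ∀ t : Nat, J ≤ t → g^[t + P] x = g^[t] x := by
    intro t ht
    obtain ⟨d, rfl⟩ := Nat.exists_eq_add_of_le ht
    calc g^[J + d + P] x = g^[d + (J + P)] x := by rw [show J + d + P = d + (J + P) from by omega]
      _ = g^[d] (g^[J + P] x) := Function.iterate_add_apply g d (J + P) x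
      _ = g^[d] (g^[J] x) := by rw [h]
      _ = g^[d + J] x := (Function.iterate_add_apply g d J x).symm
      _ = g^[J + d] x := by rw [Nat.add_comm]
  intro m
  induction m with
  | zero => intro t ht; simp
  | succ m ih =>
    intro t ht
    have e : t + P * (m + 1) = (t + P) + P * m := by ring
    rw [e, ih (t + P) (by omega), hstep t ht]

theorem evolveAltGo_eq (num times : Int) :
    ∀ (fuel : Nat) (seen : PySem.Dict Int Int) (n i : Int),
    (times - i).toNat ≤ fuel → 0 ≤ i → i ≤ times →
    n = pvStep^[i.toNat] num →
    (∀ k j, seen.get? k = some j → 0 ≤ j ∧ j < i ∧ pvStep^[j.toNat] num = k) →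
    evolveAltGo times seen n i = pvStep^[times.toNat] num := by
  intro fuel
  induction fuel with
  | zero =>
    intro seen n i hfuel hi0 hile hn _
    have hit : ¬ i < times := by omega
    rw [evolveAltGo, dif_neg hit]
    have : i = times := le_antisymm hile (by omega)
    rw [hn, this]
  | succ fuel ih =>
    intro seen n i hfuel hi0 hile hn hinv
    by_cases hit : i < times
    · rw [evolveAltGo, dif_pos hit]
      cases hg : seen.get? n with
      | none =>
        simp only
        apply ih
        · omega
        · omega
        · omega
        · rw [show (i + 1).toNat = i.toNat + 1 from by omega,
            Function.iterate_succ_apply', hn]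
        · intro k j hkj
          rcases Decidable.em (k = n) with hk | hk
          · subst hk
            rw [PySem.Dict.get?_insert] at hkj
            simp at hkj
            subst hkj
            exact ⟨hi0, by omega, hn.symm⟩
          · rw [PySem.Dict.get?_insert, if_neg hk] at hkj
            obtain ⟨h1, h2, h3⟩ := hinv k j hkj
            exact ⟨h1, by omega, h3⟩
      | some j =>
        simp only
        obtain ⟨hj0, hji, hjn⟩ := hinv n j hg
        have hp : (0:Int) < i - j := by omega
        set r := PySem.Int.mod (times - i) (i - j) with hr
        have hr0 : 0 ≤ r := PySem.Int.mod_nonneg _ hp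
        have hrlt : r < i - j := PySem.Int.mod_lt _ hp
        have hdiv := PySem.Int.floordiv_mul_add_mod (times - i) (i - j)
        rw [← hr] at hdiv
        set q := PySem.Int.floordiv (times - i) (i - j) with hq
        have hq0 : 0 ≤ q := by
          rw [hq, PySem.Int.floordiv_eq_ediv_of_pos hp]
          exact Int.ediv_nonneg (by omega) (by omega)
        rw [foldl_const_iterate, PySem.List.length_pyRange_one,
          show r - 0 = r from by ring]
        have hJP : pvStep^[j.toNat + (i - j).toNat] num = pvStep^[j.toNat] num := by
          rw [show j.toNat + (i - j).toNat = i.toNat from by omega, ← hn, hjn]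
        have harith : r.toNat + i.toNat + (i - j).toNat * q.toNat = times.toNat := by
          have hcast : ((r.toNat + i.toNat + (i - j).toNat * q.toNat : Nat) : Int) = times := by
            push_cast [Int.toNat_of_nonneg hr0, Int.toNat_of_nonneg hi0,
              Int.toNat_of_nonneg (show (0:Int) ≤ i - j from by omega),
              Int.toNat_of_nonneg hq0]
            linarith [hdiv]
          omega
        rw [hn, ← Function.iterate_add_apply, ← harith]
        exact (iterate_periodic pvStep num j.toNat (i - j).toNat hJP q.toNat
          (r.toNat + i.toNat) (by omega)).symm
    · rw [evolveAltGo, dif_neg hit]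
      have : i = times := le_antisymm hile (by omega)
      rw [hn, this]

-- ===== VERDICT (by name: the statement is the Claim_ definition above) =====
theorem evolve_spec : Claim_equal_evolve := by
  intro num times _
  unfold Spec_evolve
  rw [evolve_eq_iterate]
  unfold evolve_alt
  by_cases ht : 0 < times
  · rw [evolveAltGo_eq num times (times - 0).toNat PySem.Dict.empty num 0
      (le_refl _) (le_refl 0) (by omega) (by simp)
      (by intro k j h; simp [PySem.Dict.get?_empty] at h)]
  · rw [evolveAltGo, dif_neg ht]
    have : times.toNat = 0 := by omega
    rw [this]
    rfl
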